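-- pv_equiv track=rewrite | github.com/oscarwangr-creator/R4nger-v2 | cli/registry.py | _diff_tools
-- ===== SOURCE A (Python) =====
-- from typing import Any, Dict, Iterable, List, Sequence
--
-- def _diff_tools(previous_tools: Sequence[Dict[str, Any]], current_tools: Sequence[Dict[str, Any]]) -> Dict[str, Any]:
--     prev_map = {item["name"]: item for item in previous_tools}
--     curr_map = {item["name"]: item for item in current_tools}
--     added = sorted(set(curr_map) - set(prev_map))
--     removed = sorted(set(prev_map) - set(curr_map))
--     changed: List[str] = []
--     for name in sorted(set(prev_map) & set(curr_map)):
--         a = prev_map[name]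
--         b = curr_map[name]
--         if any(a.get(key) != b.get(key) for key in ("purpose", "stages", "category", "input_types", "output_types", "dependencies")):
--             changed.append(name)
--     return {"added": added, "removed": removed, "changed": changed}
-- ===== SOURCE B (Python) =====
-- _KEYS = ("purpose", "stages", "category", "input_types", "output_types", "dependencies")
--
-- def _diff_tools(previous_tools, current_tools):
--     prev = sorted({item["name"]: item for item in previous_tools}.items(), key=lambda kv: kv[0])
--     curr = sorted({item["name"]: item for item in current_tools}.items(), key=lambda kv: kv[0])
--     added, removed, changed = [], [], []
--     i = j = 0
--     while i < len(prev) and j < len(curr):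
--         pn, a = prev[i]
--         cn, b = curr[j]
--         if pn < cn:
--             removed.append(pn)
--             i += 1
--         elif cn < pn:
--             added.append(cn)
--             j += 1
--         else:
--             if any(a.get(k) != b.get(k) for k in _KEYS):
--                 changed.append(pn)
--             i += 1
--             j += 1
--     removed.extend(n for n, _ in prev[i:])
--     added.extend(n for n, _ in curr[j:])
--     return {"added": added, "removed": removed, "changed": changed}
-- ===== Notes on version B (the rewrite author's own statement) =====
-- stated objective: alternative
-- what changed: Instead of three set operations over the key sets, B sorts the two name->record item lists once and classifies names with a two-pointer merge of the sorted lists, with no membership tests or by-name lookups.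
import Mathlib
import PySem

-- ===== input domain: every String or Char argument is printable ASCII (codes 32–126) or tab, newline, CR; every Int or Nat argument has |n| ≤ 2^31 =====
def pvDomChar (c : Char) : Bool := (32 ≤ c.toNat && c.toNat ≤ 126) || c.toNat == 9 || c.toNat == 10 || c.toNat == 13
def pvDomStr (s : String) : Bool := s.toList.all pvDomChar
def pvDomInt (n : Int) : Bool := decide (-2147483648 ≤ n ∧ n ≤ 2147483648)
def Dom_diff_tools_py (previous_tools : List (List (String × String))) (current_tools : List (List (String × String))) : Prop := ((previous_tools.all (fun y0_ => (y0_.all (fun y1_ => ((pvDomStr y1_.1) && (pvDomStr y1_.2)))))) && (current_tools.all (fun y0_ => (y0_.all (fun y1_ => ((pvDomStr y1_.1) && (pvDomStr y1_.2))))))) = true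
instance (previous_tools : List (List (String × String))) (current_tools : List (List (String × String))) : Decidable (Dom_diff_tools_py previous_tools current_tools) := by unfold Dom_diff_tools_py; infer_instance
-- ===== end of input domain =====

-- B replaces A's three set operations on the key sets by sorting the two item lists
-- once and classifying every name with a two-pointer merge (objective: alternative, same cost).

-- ===== PORT A =====
-- shared helper: both Pythons build the name->item dicts with the identical dict comprehension
-- (item["name"] is ported as getD "name" "" — a totality guard; Pre_ guarantees the key is present)
def pvBuildMap (tools : List (List (String × String))) : PySem.Dict String (PySem.Dict String String) :=
  tools.foldl (fun d item =>
    d.insert ((PySem.Dict.ofList item).getD "name" "") (PySem.Dict.ofList item)) PySem.Dict.empty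

def pvKeys6 : List String := ["purpose", "stages", "category", "input_types", "output_types", "dependencies"]

def diff_tools_py (previous_tools : List (List (String × String))) (current_tools : List (List (String × String))) : List (String × List String) :=
  let prev_map := pvBuildMap previous_tools
  let curr_map := pvBuildMap current_tools
  let added := PySem.List.sorted (PySem.Set.diff (PySem.Set.ofList curr_map.keys) (PySem.Set.ofList prev_map.keys)) (fun x => x) false
  let removed := PySem.List.sorted (PySem.Set.diff (PySem.Set.ofList prev_map.keys) (PySem.Set.ofList curr_map.keys)) (fun x => x) false
  let changed := (PySem.List.sorted (PySem.Set.inter (PySem.Set.ofList prev_map.keys) (PySem.Set.ofList curr_map.keys)) (fun x => x) false).foldl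
    (fun acc name =>
      let a := prev_map.getD name PySem.Dict.empty   -- prev_map[name]; name ∈ prev_map here, so getD never defaults
      let b := curr_map.getD name PySem.Dict.empty
      if pvKeys6.any (fun key => a.get? key != b.get? key) then acc ++ [name] else acc) []
  [("added", added), ("removed", removed), ("changed", changed)]

-- ===== PORT B =====
-- any(a.get(k) != b.get(k) for k in _KEYS)
def pvAnyDiffD (a b : PySem.Dict String String) : Bool :=
  pvKeys6.any (fun key => a.get? key != b.get? key)

-- the two-pointer while loop of Source B, on the two sorted suffixes, with the three accumulators
def pvMergeLoop : List (String × PySem.Dict String String) → List (String × PySem.Dict String String) →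
    List String × List String × List String → List String × List String × List String
  | (pn, a) :: p', (cn, b) :: q', (ad, rm, ch) =>
    if pn < cn then pvMergeLoop p' ((cn, b) :: q') (ad, rm ++ [pn], ch)
    else if cn < pn then pvMergeLoop ((pn, a) :: p') q' (ad ++ [cn], rm, ch)
    else pvMergeLoop p' q' (if pvAnyDiffD a b then (ad, rm, ch ++ [pn]) else (ad, rm, ch))
  | p, q, (ad, rm, ch) => (ad ++ q.map (·.1), rm ++ p.map (·.1), ch)   -- the two extends after the loop
termination_by p q _ => p.length + q.length

def diff_tools_py_alt (previous_tools : List (List (String × String))) (current_tools : List (List (String × String))) : List (String × List String) :=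
  let prev := PySem.List.sorted (pvBuildMap previous_tools).items (fun kv => kv.1) false
  let curr := PySem.List.sorted (pvBuildMap current_tools).items (fun kv => kv.1) false
  let r := pvMergeLoop prev curr ([], [], [])
  [("added", r.1), ("removed", r.2.1), ("changed", r.2.2)]

-- ===== PRECONDITION & SPEC =====
-- Pre_ excludes exactly the inputs where some tool lacks the "name" key, on which the Python A raises KeyError.
def Pre_diff_tools_py (previous_tools : List (List (String × String))) (current_tools : List (List (String × String))) : Prop :=
  ((previous_tools.all (fun item => item.any (fun p => p.1 == "name"))) &&
   (current_tools.all (fun item => item.any (fun p => p.1 == "name")))) = true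
instance (previous_tools : List (List (String × String))) (current_tools : List (List (String × String))) : Decidable (Pre_diff_tools_py previous_tools current_tools) := by unfold Pre_diff_tools_py; infer_instance

def pvWitness_diff_tools_py : (List (List (String × String))) × (List (List (String × String))) :=
  ([[("name", "a"), ("purpose", "p")]], [[("name", "a"), ("purpose", "q")], [("name", "b")]])

def Spec_diff_tools_py (previous_tools : List (List (String × String))) (current_tools : List (List (String × String))) (out : List (String × List String)) : Prop := out = diff_tools_py_alt previous_tools current_tools
instance (previous_tools : List (List (String × String))) (current_tools : List (List (String × String))) (out : List (String × List String)) : Decidable (Spec_diff_tools_py previous_tools current_tools out) := by unfold Spec_diff_tools_py; infer_instance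

-- ===== CLAIM (what is proved, stated in full; the proofs are below) =====
def Claim_equal_diff_tools_py : Prop := ∀ (previous_tools : List (List (String × String))) (current_tools : List (List (String × String))), Dom_diff_tools_py previous_tools current_tools → Pre_diff_tools_py previous_tools current_tools → Spec_diff_tools_py previous_tools current_tools (diff_tools_py previous_tools current_tools)

-- ===== LEMMAS AND PROOFS =====

-- closed forms of the three lists B's merge produces, for strictly key-sorted inputs
def pvAddS (p q : List (String × PySem.Dict String String)) : List String :=
  (q.map (·.1)).filter (fun n => !((p.map (·.1)).contains n))
def pvRemS (p q : List (String × PySem.Dict String String)) : List String :=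
  (p.map (·.1)).filter (fun n => !((q.map (·.1)).contains n))
def pvChgS (p q : List (String × PySem.Dict String String)) : List String :=
  (p.filter (fun na => match q.find? (fun qb => qb.1 == na.1) with
    | some b => pvAnyDiffD na.2 b.2
    | none => false)).map (·.1)

lemma pvContainsFalse (l : List String) (n : String) (h : ∀ x ∈ l, n < x) : l.contains n = false := by
  simp only [List.contains_eq_mem, decide_eq_false_iff_not]
  exact fun hm => absurd (h n hm) (lt_irrefl n)

lemma pvMergeLoop_spec (p q : List (String × PySem.Dict String String))
    (acc : List String × List String × List String)
    (hp : p.Pairwise (fun x y => x.1 < y.1)) (hq : q.Pairwise (fun x y => x.1 < y.1)) :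
    pvMergeLoop p q acc = (acc.1 ++ pvAddS p q, acc.2.1 ++ pvRemS p q, acc.2.2 ++ pvChgS p q) := by
  revert hp hq
  induction p, q, acc using pvMergeLoop.induct with
  | case1 pn a p' cn b q' ad rm ch hlt ih =>
    intro hp hq
    have hqk : ∀ x ∈ (cn, b) :: q', pn < x.1 := by
      intro x hx
      rcases List.mem_cons.mp hx with h | h
      · rw [h]; exact hlt
      · exact lt_trans hlt ((List.pairwise_cons.mp hq).1 x h)
    have hA : pvAddS ((pn, a) :: p') ((cn, b) :: q') = pvAddS p' ((cn, b) :: q') := by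
      unfold pvAddS
      apply List.filter_congr
      intro n hn
      rcases List.mem_map.mp hn with ⟨x, hx, hxn⟩
      have hne : (n == pn) = false := by
        simp only [beq_eq_false_iff_ne]; exact (ne_of_gt (hxn ▸ hqk x hx))
      rw [List.map_cons, List.contains_cons, hne, Bool.false_or]
    have hR : pvRemS ((pn, a) :: p') ((cn, b) :: q') = pn :: pvRemS p' ((cn, b) :: q') := by
      unfold pvRemS
      simp only [List.map_cons, List.filter_cons]
      rw [pvContainsFalse _ pn (fun x hx => by
        rcases List.mem_cons.mp hx with h | h
        · rw [h]; exact hlt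
        · rcases List.mem_map.mp h with ⟨y, hy, hyx⟩
          exact hyx ▸ lt_trans hlt ((List.pairwise_cons.mp hq).1 y hy))]
      rfl
    have hC : pvChgS ((pn, a) :: p') ((cn, b) :: q') = pvChgS p' ((cn, b) :: q') := by
      unfold pvChgS
      have h0 : List.find? (fun qb => qb.1 == pn) ((cn, b) :: q') = none :=
        List.find?_eq_none.mpr (fun x hx => by simpa using ne_of_gt (hqk x hx))
      simp [h0]
    rw [pvMergeLoop, if_pos hlt, ih (List.pairwise_cons.mp hp).2 hq, hA, hR, hC]
    simp
  | case2 pn a p' cn b q' ad rm ch hnlt hlt ih =>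
    intro hp hq
    have hpk : ∀ x ∈ (pn, a) :: p', cn < x.1 := by
      intro x hx
      rcases List.mem_cons.mp hx with h | h
      · rw [h]; exact hlt
      · exact lt_trans hlt ((List.pairwise_cons.mp hp).1 x h)
    have hA : pvAddS ((pn, a) :: p') ((cn, b) :: q') = cn :: pvAddS ((pn, a) :: p') q' := by
      unfold pvAddS
      simp only [List.map_cons, List.filter_cons]
      rw [pvContainsFalse _ cn (fun x hx => by
        rcases List.mem_cons.mp hx with h | h
        · rw [h]; exact hlt
        · rcases List.mem_map.mp h with ⟨y, hy, hyx⟩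
          exact hyx ▸ lt_trans hlt ((List.pairwise_cons.mp hp).1 y hy))]
      rfl
    have hR : pvRemS ((pn, a) :: p') ((cn, b) :: q') = pvRemS ((pn, a) :: p') q' := by
      unfold pvRemS
      apply List.filter_congr
      intro n hn
      rcases List.mem_map.mp hn with ⟨x, hx, hxn⟩
      have hne : (n == cn) = false := by
        simp only [beq_eq_false_iff_ne]; exact (ne_of_gt (hxn ▸ hpk x hx))
      rw [List.map_cons, List.contains_cons, hne, Bool.false_or]
    have hC : pvChgS ((pn, a) :: p') ((cn, b) :: q') = pvChgS ((pn, a) :: p') q' := by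
      unfold pvChgS
      congr 1
      apply List.filter_congr
      intro na hna
      have h0 : List.find? (fun qb => qb.1 == na.1) ((cn, b) :: q') =
          List.find? (fun qb => qb.1 == na.1) q' := by
        rw [List.find?_cons_of_neg]
        simpa using ne_of_lt (hpk na hna)
      rw [h0]
    rw [pvMergeLoop, if_neg hnlt, if_pos hlt, ih hp (List.pairwise_cons.mp hq).2, hA, hR, hC]
    simp
  | case3 pn a p' cn b q' ad rm ch hnlt1 hnlt2 ih =>
    intro hp hq
    have heq : pn = cn := le_antisymm (le_of_not_gt hnlt2) (le_of_not_gt hnlt1)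
    subst heq
    have hpk : ∀ x ∈ p', pn < x.1 := fun x hx => (List.pairwise_cons.mp hp).1 x hx
    have hqk : ∀ x ∈ q', pn < x.1 := fun x hx => (List.pairwise_cons.mp hq).1 x hx
    have hA : pvAddS ((pn, a) :: p') ((pn, b) :: q') = pvAddS p' q' := by
      unfold pvAddS
      simp only [List.map_cons, List.filter_cons, List.contains_cons, BEq.rfl, Bool.true_or,
        Bool.not_true]
      simp only [Bool.false_eq_true, if_false]
      apply List.filter_congr
      intro n hn
      rcases List.mem_map.mp hn with ⟨x, hx, hxn⟩
      have hne : (n == pn) = false := by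
        simp only [beq_eq_false_iff_ne]; exact (ne_of_gt (hxn ▸ hqk x hx))
      rw [hne, Bool.false_or]
    have hR : pvRemS ((pn, a) :: p') ((pn, b) :: q') = pvRemS p' q' := by
      unfold pvRemS
      simp only [List.map_cons, List.filter_cons, List.contains_cons, BEq.rfl, Bool.true_or,
        Bool.not_true]
      simp only [Bool.false_eq_true, if_false]
      apply List.filter_congr
      intro n hn
      rcases List.mem_map.mp hn with ⟨x, hx, hxn⟩
      have hne : (n == pn) = false := by
        simp only [beq_eq_false_iff_ne]; exact (ne_of_gt (hxn ▸ hpk x hx))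
      rw [hne, Bool.false_or]
    have hC : pvChgS ((pn, a) :: p') ((pn, b) :: q') =
        (if pvAnyDiffD a b then [pn] else []) ++ pvChgS p' q' := by
      unfold pvChgS
      have h0 : List.find? (fun qb => qb.1 == pn) ((pn, b) :: q') = some (pn, b) := by
        rw [List.find?_cons_of_pos (by simp)]
      have ht : List.filter (fun na => match List.find? (fun qb => qb.1 == na.1) ((pn, b) :: q') with
            | some b => pvAnyDiffD na.2 b.2
            | none => false) p' =
          List.filter (fun na => match List.find? (fun qb => qb.1 == na.1) q' with
            | some b => pvAnyDiffD na.2 b.2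
            | none => false) p' := by
        apply List.filter_congr
        intro na hna
        have h1 : List.find? (fun qb => qb.1 == na.1) ((pn, b) :: q') =
            List.find? (fun qb => qb.1 == na.1) q' := by
          rw [List.find?_cons_of_neg]
          simpa using ne_of_lt (hpk na hna)
        rw [h1]
      simp only [List.filter_cons, h0, ht]
      by_cases hd : pvAnyDiffD a b <;> simp [hd]
    have ih' := ih (List.pairwise_cons.mp hp).2 (List.pairwise_cons.mp hq).2
    by_cases hd : pvAnyDiffD a b
    · rw [dif_pos hd] at ih'
      rw [pvMergeLoop, if_neg hnlt1, if_neg hnlt2, if_pos hd, ih', hA, hR, hC]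
      simp [hd]
    · rw [dif_neg hd] at ih'
      rw [pvMergeLoop, if_neg hnlt1, if_neg hnlt2, if_neg hd, ih', hA, hR, hC]
      simp [hd]
  | case4 p q ad rm ch hno =>
    intro hp hq
    match p, q, hno with
    | [], q, _ =>
      rw [pvMergeLoop.eq_def]
      simp only []
      unfold pvAddS pvRemS pvChgS
      simp
    | (pn, a) :: p', [], hno =>
      rw [pvMergeLoop.eq_def]
      unfold pvAddS pvRemS pvChgS
      simp [List.find?]
    | (pn, a) :: p', (cn, b) :: q', hno =>
      exact absurd (hno pn a p' cn b q' rfl rfl) (fun h => h)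

-- two strictly increasing string lists with the same members are equal
lemma pvStrictEq (l1 l2 : List String) (h1 : l1.Pairwise (· < ·)) (h2 : l2.Pairwise (· < ·))
    (hm : ∀ x, x ∈ l1 ↔ x ∈ l2) : l1 = l2 := by
  exact ((List.perm_ext_iff_of_nodup (h1.imp ne_of_lt) (h2.imp ne_of_lt)).mpr hm).eq_of_pairwise
    (fun a b _ _ h h' => absurd h' (lt_asymm h)) h1 h2

-- sorted over a PySem.Set is strictly increasing
lemma pvSortedSetPairwise (s : PySem.Set String) (h : s.Nodup) :
    (PySem.List.sorted s (fun x => x) false).Pairwise (· < ·) := by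
  have h2 := PySem.List.sorted_ofList_pairwise_lt s
  rwa [PySem.Set.ofList_eq_self_of_nodup s h] at h2

lemma pvBuildMap_keys_nodup (tools : List (List (String × String))) : (pvBuildMap tools).keys.Nodup := by
  unfold pvBuildMap
  exact PySem.Dict.nodup_keys_foldl_insert_key tools
    (fun item => (PySem.Dict.ofList item).getD "name" "")
    (fun _ item => PySem.Dict.ofList item) PySem.Dict.empty PySem.Dict.nodup_keys_empty

-- find? by key on a list with distinct keys returns the unique matching pair
lemma pvFindNodup (l : List (String × PySem.Dict String String)) (hnd : (l.map (·.1)).Nodup)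
    (n : String) (b : PySem.Dict String String) (hmem : (n, b) ∈ l) :
    l.find? (fun qb => qb.1 == n) = some (n, b) := by
  induction l with
  | nil => cases hmem
  | cons x t ih =>
    rw [List.map_cons] at hnd
    rcases List.mem_cons.mp hmem with h | h
    · rw [← h, List.find?_cons_of_pos (by simp)]
    · have hx : x.1 ≠ n := by
        intro he
        have hm : n ∈ t.map (·.1) := List.mem_map.mpr ⟨(n, b), h, rfl⟩
        exact (List.nodup_cons.mp hnd).1 (he ▸ hm)
      rw [List.find?_cons_of_neg (by simpa using hx)]
      exact ih (List.nodup_cons.mp hnd).2 h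

theorem diff_tools_py_spec : Claim_equal_diff_tools_py := by
  intro prev curr _ _
  simp only [Spec_diff_tools_py, diff_tools_py, diff_tools_py_alt]
  set dp := pvBuildMap prev with hdp
  set dq := pvBuildMap curr with hdq
  have hnp : dp.keys.Nodup := pvBuildMap_keys_nodup prev
  have hnq : dq.keys.Nodup := pvBuildMap_keys_nodup curr
  set p := PySem.List.sorted dp.items (fun kv => kv.1) false with hps
  set q := PySem.List.sorted dq.items (fun kv => kv.1) false with hqs
  -- facts about the sorted item lists
  have hpperm : (p.map (·.1)).Perm dp.keys := by
    have := (PySem.List.sorted_perm dp.items (fun kv => kv.1) false).map (·.1)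
    simpa [PySem.Dict.keys] using this
  have hqperm : (q.map (·.1)).Perm dq.keys := by
    have := (PySem.List.sorted_perm dq.items (fun kv => kv.1) false).map (·.1)
    simpa [PySem.Dict.keys] using this
  have hpnd : (p.map (·.1)).Nodup := hpperm.nodup_iff.mpr hnp
  have hqnd : (q.map (·.1)).Nodup := hqperm.nodup_iff.mpr hnq
  have hpsort : p.Pairwise (fun x y => x.1 < y.1) := by
    have h1 : p.Pairwise (fun x y => x.1 ≤ y.1) := PySem.List.sorted_pairwise dp.items _
    have h2 : p.Pairwise (fun x y => x.1 ≠ y.1) := List.pairwise_map.mp hpnd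
    exact (h1.and h2).imp (fun h => lt_of_le_of_ne h.1 h.2)
  have hqsort : q.Pairwise (fun x y => x.1 < y.1) := by
    have h1 : q.Pairwise (fun x y => x.1 ≤ y.1) := PySem.List.sorted_pairwise dq.items _
    have h2 : q.Pairwise (fun x y => x.1 ≠ y.1) := List.pairwise_map.mp hqnd
    exact (h1.and h2).imp (fun h => lt_of_le_of_ne h.1 h.2)
  have hpmemf : ∀ n, n ∈ p.map (·.1) ↔ n ∈ dp.keys := fun n => hpperm.mem_iff
  have hqmemf : ∀ n, n ∈ q.map (·.1) ↔ n ∈ dq.keys := fun n => hqperm.mem_iff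
  have hpitems : ∀ x : String × PySem.Dict String String, x ∈ p ↔ dp.get? x.1 = some x.2 := by
    intro x
    rw [hps, PySem.List.mem_sorted, ← PySem.Dict.get?_eq_some_iff_mem_items dp x.1 x.2 hnp]
  have hqitems : ∀ x : String × PySem.Dict String String, x ∈ q ↔ dq.get? x.1 = some x.2 := by
    intro x
    rw [hqs, PySem.List.mem_sorted, ← PySem.Dict.get?_eq_some_iff_mem_items dq x.1 x.2 hnq]
  rw [pvMergeLoop_spec p q ([], [], []) hpsort hqsort]
  rw [PySem.List.foldl_append_if]
  refine List.cons_eq_cons.mpr ⟨?_, List.cons_eq_cons.mpr ⟨?_, List.cons_eq_cons.mpr ⟨?_, rfl⟩⟩⟩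
  · -- added
    refine congrArg _ (pvStrictEq _ _ ?_ ?_ ?_)
    · apply pvSortedSetPairwise; exact PySem.Set.nodup_diff _ _ (PySem.Set.nodup_ofList _)
    · simp only [List.nil_append]
      exact List.Pairwise.filter _ (List.pairwise_map.mpr hqsort)
    · intro n
      simp only [PySem.List.mem_sorted, PySem.Set.mem_diff, PySem.Set.mem_ofList,
        List.nil_append, pvAddS, List.mem_filter, Bool.not_eq_eq_eq_not, Bool.not_true,
        List.contains_eq_mem, decide_eq_false_iff_not, hpmemf n, hqmemf n]
  · -- removed
    refine congrArg _ (pvStrictEq _ _ ?_ ?_ ?_)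
    · apply pvSortedSetPairwise; exact PySem.Set.nodup_diff _ _ (PySem.Set.nodup_ofList _)
    · simp only [List.nil_append]
      exact List.Pairwise.filter _ (List.pairwise_map.mpr hpsort)
    · intro n
      simp only [PySem.List.mem_sorted, PySem.Set.mem_diff, PySem.Set.mem_ofList,
        List.nil_append, pvRemS, List.mem_filter, Bool.not_eq_eq_eq_not, Bool.not_true,
        List.contains_eq_mem, decide_eq_false_iff_not, hpmemf n, hqmemf n]
  · -- changed
    refine congrArg _ ?_
    rw [List.map_id']
    refine pvStrictEq _ _ ?_ ?_ ?_
    · refine List.Pairwise.filter _ ?_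
      apply pvSortedSetPairwise; exact PySem.Set.nodup_inter _ _ (PySem.Set.nodup_ofList _)
    · simp only [List.nil_append, pvChgS]
      exact List.pairwise_map.mpr (List.Pairwise.sublist List.filter_sublist hpsort)
    · intro n
      constructor
      · -- A's side → B's side
        intro hn
        rw [List.nil_append, List.mem_filter] at hn
        obtain ⟨hmem, hpred⟩ := hn
        rw [PySem.List.mem_sorted, PySem.Set.mem_inter, PySem.Set.mem_ofList, PySem.Set.mem_ofList] at hmem
        obtain ⟨hnp', hnq'⟩ := hmem
        obtain ⟨a, ha⟩ : ∃ a, dp.get? n = some a := by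
          rcases h : dp.get? n with _ | a
          · exact absurd ((PySem.Dict.get?_eq_none_iff_not_mem_keys dp n).mp h) (not_not.mpr hnp')
          · exact ⟨a, rfl⟩
        obtain ⟨b, hb⟩ : ∃ b, dq.get? n = some b := by
          rcases h : dq.get? n with _ | b
          · exact absurd ((PySem.Dict.get?_eq_none_iff_not_mem_keys dq n).mp h) (not_not.mpr hnq')
          · exact ⟨b, rfl⟩
        simp only [List.nil_append, pvChgS, List.mem_map]
        refine ⟨(n, a), ?_, rfl⟩
        rw [List.mem_filter]
        refine ⟨(hpitems (n, a)).mpr ha, ?_⟩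
        rw [pvFindNodup q hqnd n b ((hqitems (n, b)).mpr hb)]
        simpa [pvAnyDiffD, PySem.Dict.getD_of_get?_eq_some _ PySem.Dict.empty ha,
          PySem.Dict.getD_of_get?_eq_some _ PySem.Dict.empty hb] using hpred
      · -- B's side → A's side
        intro hn
        simp only [List.nil_append, pvChgS, List.mem_map] at hn
        obtain ⟨⟨m, a⟩, hmem, rfl⟩ := hn
        rw [List.mem_filter] at hmem
        obtain ⟨hmp, hpred⟩ := hmem
        have ha : dp.get? m = some a := (hpitems (m, a)).mp hmp
        rcases hfq : q.find? (fun qb => qb.1 == m) with _ | nb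
        · rw [hfq] at hpred; simp at hpred
        · rw [hfq] at hpred
          have hnb := List.find?_some hfq
          have hnbm := List.mem_of_find?_eq_some hfq
          rw [beq_iff_eq] at hnb
          have hb : dq.get? m = some nb.2 := by
            have := (hqitems nb).mp hnbm
            rwa [hnb] at this
          rw [List.nil_append, List.mem_filter]
          constructor
          · rw [PySem.List.mem_sorted, PySem.Set.mem_inter, PySem.Set.mem_ofList, PySem.Set.mem_ofList]
            exact ⟨PySem.Dict.mem_keys_of_mem_items dp ((PySem.Dict.get?_eq_some_iff_mem_items dp m a hnp).mp ha),
              PySem.Dict.mem_keys_of_mem_items dq (p := (m, nb.2)) ((PySem.Dict.get?_eq_some_iff_mem_items dq m nb.2 hnq).mp hb)⟩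
          · simpa [pvAnyDiffD, PySem.Dict.getD_of_get?_eq_some _ PySem.Dict.empty ha,
              PySem.Dict.getD_of_get?_eq_some _ PySem.Dict.empty hb] using hpred
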